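-- pv_equiv track=rewrite | github.com/RishiSD/commit-to-change | agent/eval_scripts/eval_agent_trajectory.py | check_ordered_tools
-- ===== SOURCE A (Python) =====
-- from typing import List
--
-- def check_ordered_tools(tools_used: List[str], expected_tools: List[str]) -> tuple[bool, str]:
--     """Check if expected tools appear in order in the tools_used list."""
--     if not expected_tools:
--         return True, "No expected tools specified"
--
--     expected_idx = 0
--
--     for tool in tools_used:
--         if expected_idx < len(expected_tools) and tool == expected_tools[expected_idx]:
--             expected_idx += 1
--
--     if expected_idx == len(expected_tools):
--         return True, f"All expected tools called in order: {expected_tools}"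
--     else:
--         missing_tools = expected_tools[expected_idx:]
--         return False, f"Expected tools {expected_tools} but got {tools_used}. Missing: {missing_tools}"
-- ===== SOURCE B (Python) =====
-- from typing import List
--
-- def check_ordered_tools(tools_used: List[str], expected_tools: List[str]) -> tuple[bool, str]:
--     """Check if expected tools appear in order in the tools_used list."""
--     if not expected_tools:
--         return True, "No expected tools specified"
--
--     pos = 0
--     matched = 0
--     for tool in expected_tools:
--         try:
--             pos = tools_used.index(tool, pos) + 1
--         except ValueError:
--             break
--         matched += 1
--
--     if matched == len(expected_tools):
--         return True, f"All expected tools called in order: {expected_tools}"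
--     else:
--         missing_tools = expected_tools[matched:]
--         return False, f"Expected tools {expected_tools} but got {tools_used}. Missing: {missing_tools}"
-- ===== Notes on version B (the rewrite author's own statement) =====
-- stated objective: alternative
-- what changed: A folds once over tools_used advancing a cursor into expected_tools; B loops over expected_tools and forward-searches tools_used with list.index from a moving start position (try/except ValueError), counting matches.
import Mathlib
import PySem

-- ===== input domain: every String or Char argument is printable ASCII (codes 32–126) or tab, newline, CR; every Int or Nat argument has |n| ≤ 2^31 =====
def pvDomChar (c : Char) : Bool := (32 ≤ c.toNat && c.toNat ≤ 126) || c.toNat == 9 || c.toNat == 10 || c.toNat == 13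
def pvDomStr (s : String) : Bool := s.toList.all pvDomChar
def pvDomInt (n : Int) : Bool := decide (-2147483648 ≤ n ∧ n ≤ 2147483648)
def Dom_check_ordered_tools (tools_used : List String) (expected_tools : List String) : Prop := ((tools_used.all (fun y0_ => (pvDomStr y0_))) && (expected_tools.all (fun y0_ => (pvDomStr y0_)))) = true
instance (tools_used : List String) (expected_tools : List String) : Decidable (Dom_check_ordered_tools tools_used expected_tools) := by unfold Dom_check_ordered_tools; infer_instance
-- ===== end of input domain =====

-- B replaces A's single pass over tools_used (cursor into expected_tools) by a loop over
-- expected_tools with a forward list.index search into tools_used; objective: alternative decomposition.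

-- Shared message helper: Python repr of a str / list[str], hand-ported; exact on the stated
-- domain (printable ASCII plus tab/newline/CR), where repr only escapes \, the quote, \t, \n, \r.
def pyEscChar (q : Char) (c : Char) : List Char :=
  if c = '\\' then ['\\', '\\']
  else if c = q then ['\\', q]
  else if c = '\t' then ['\\', 't']
  else if c = '\n' then ['\\', 'n']
  else if c = '\r' then ['\\', 'r']
  else [c]

def pyReprStr (s : String) : String :=
  let cs := s.toList
  let q : Char := if cs.contains '\'' && !(cs.contains '"') then '"' else '\''
  String.ofList (q :: (cs.flatMap (pyEscChar q) ++ [q]))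

def pyReprStrList (xs : List String) : String :=
  "[" ++ String.intercalate ", " (xs.map pyReprStr) ++ "]"

-- ===== PORT A =====
def check_ordered_tools (tools_used : List String) (expected_tools : List String) : Bool × String :=
  if expected_tools.isEmpty then (true, "No expected tools specified")
  else
    let expected_idx := tools_used.foldl
      (fun idx tool => if idx < expected_tools.length && tool == expected_tools.getD idx "" then idx + 1 else idx) 0
    if expected_idx = expected_tools.length then
      (true, "All expected tools called in order: " ++ pyReprStrList expected_tools)
    else
      (false, "Expected tools " ++ pyReprStrList expected_tools ++ " but got " ++
        pyReprStrList tools_used ++ ". Missing: " ++ pyReprStrList (expected_tools.drop expected_idx))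

-- ===== PORT B =====
-- the for-loop of Source B: pos = tools_used.index(tool, pos) + 1 (ValueError → break), matched += 1
def altSearch (tools_used : List String) : List String → Nat → Nat → Nat
  | [], _, matched => matched
  | tool :: rest, pos, matched =>
    match (tools_used.drop pos).idxOf? tool with   -- tools_used.index(tool, pos) = pos + i; none = ValueError
    | none => matched
    | some i => altSearch tools_used rest (pos + i + 1) (matched + 1)

def check_ordered_tools_alt (tools_used : List String) (expected_tools : List String) : Bool × String :=
  if expected_tools.isEmpty then (true, "No expected tools specified")
  else
    let matched := altSearch tools_used expected_tools 0 0
    if matched = expected_tools.length then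
      (true, "All expected tools called in order: " ++ pyReprStrList expected_tools)
    else
      (false, "Expected tools " ++ pyReprStrList expected_tools ++ " but got " ++
        pyReprStrList tools_used ++ ". Missing: " ++ pyReprStrList (expected_tools.drop matched))

-- ===== PRECONDITION & SPEC =====
def Spec_check_ordered_tools (tools_used : List String) (expected_tools : List String) (out : Bool × String) : Prop := out = check_ordered_tools_alt tools_used expected_tools
instance (tools_used : List String) (expected_tools : List String) (out : Bool × String) : Decidable (Spec_check_ordered_tools tools_used expected_tools out) := by unfold Spec_check_ordered_tools; infer_instance

-- ===== CLAIM (what is proved, stated in full; the proofs are below) =====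
def Claim_equal_check_ordered_tools : Prop := ∀ (tools_used : List String) (expected_tools : List String), Dom_check_ordered_tools tools_used expected_tools → Spec_check_ordered_tools tools_used expected_tools (check_ordered_tools tools_used expected_tools)

-- ===== LEMMAS AND PROOFS =====

-- number of expected tools greedily matched, in order, against the tool list
def greedy : List String → List String → Nat
  | _, [] => 0
  | [], _ :: _ => 0
  | t :: ts, e :: es => if t = e then 1 + greedy ts es else greedy ts (e :: es)

theorem greedy_nil_right (ts : List String) : greedy ts [] = 0 := by
  cases ts <;> rfl

theorem greedy_nil_left (es : List String) : greedy [] es = 0 := by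
  cases es <;> rfl

theorem greedy_not_mem (e : String) (es : List String) :
    ∀ (xs : List String), e ∉ xs → greedy xs (e :: es) = 0 := by
  intro xs hx
  induction xs with
  | nil => rfl
  | cons t ts ih =>
    simp only [List.mem_cons, not_or] at hx
    simp only [greedy, if_neg (Ne.symm hx.1), ih hx.2]

theorem greedy_split (e : String) (es b : List String) :
    ∀ (a : List String), e ∉ a → greedy (a ++ e :: b) (e :: es) = 1 + greedy b es := by
  intro a ha
  induction a with
  | nil => simp [greedy]
  | cons t ts ih =>
    simp only [List.mem_cons, not_or] at ha
    simp only [List.cons_append, greedy, if_neg (Ne.symm ha.1), ih ha.2]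

theorem aLoop_eq (E : List String) :
    ∀ (ts : List String) (idx : Nat),
      ts.foldl (fun idx tool => if idx < E.length && tool == E.getD idx "" then idx + 1 else idx) idx
        = idx + greedy ts (E.drop idx) := by
  intro ts
  induction ts with
  | nil => intro idx; simp [greedy_nil_left]
  | cons t ts ih =>
    intro idx
    by_cases hlt : idx < E.length
    · have hdrop : E.drop idx = E[idx] :: E.drop (idx + 1) := List.drop_eq_getElem_cons hlt
      by_cases heq : t = E[idx]
      · have hc : (idx < E.length && t == E.getD idx "") = true := by
          simp [hlt, List.getD, List.getElem?_eq_getElem hlt, heq]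
        rw [List.foldl_cons, hc, if_pos rfl, ih (idx + 1), hdrop]
        simp only [greedy, if_pos heq]
        omega
      · have hc : (idx < E.length && t == E.getD idx "") = false := by
          simp [List.getD, List.getElem?_eq_getElem hlt, heq]
        rw [List.foldl_cons, hc, if_neg (by simp), ih idx, hdrop]
        simp only [greedy, if_neg heq]
    · have hdrop : E.drop idx = [] := List.drop_eq_nil_of_le (by omega)
      have hc : (idx < E.length && t == E.getD idx "") = false := by simp [hlt]
      rw [List.foldl_cons, hc, if_neg (by simp), ih idx, hdrop]
      rw [greedy_nil_right, greedy_nil_right]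

theorem bLoop_eq (tools : List String) :
    ∀ (es : List String) (pos matched : Nat),
      altSearch tools es pos matched = matched + greedy (tools.drop pos) es := by
  intro es
  induction es with
  | nil => intro pos matched; simp [altSearch, greedy_nil_right]
  | cons e es ih =>
    intro pos matched
    cases hfind : (tools.drop pos).idxOf? e with
    | none =>
      have hnm : e ∉ tools.drop pos := List.idxOf?_eq_none_iff.mp hfind
      simp [altSearch, hfind, greedy_not_mem e es _ hnm]
    | some i =>
      obtain ⟨hi, hei, hbefore⟩ := List.idxOf?_eq_some_iff.mp hfind
      have hsplitdrop : (tools.drop pos).drop i = e :: tools.drop (pos + i + 1) := by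
        rw [List.drop_eq_getElem_cons hi, hei, List.drop_drop, ← Nat.add_assoc]
      have hdecomp : tools.drop pos = (tools.drop pos).take i ++ e :: tools.drop (pos + i + 1) := by
        rw [← hsplitdrop, List.take_append_drop]
      have hnmtake : e ∉ (tools.drop pos).take i := by
        intro hmem
        obtain ⟨j, hj, hje⟩ := List.mem_iff_getElem.mp hmem
        rw [List.length_take] at hj
        rw [List.getElem_take] at hje
        exact hbefore j (by omega) hje
      rw [hdecomp, greedy_split e es _ _ hnmtake]
      simp only [altSearch, hfind]
      rw [ih (pos + i + 1) (matched + 1)]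
      omega

theorem count_agree (tools E : List String) :
    tools.foldl (fun idx tool => if idx < E.length && tool == E.getD idx "" then idx + 1 else idx) 0
      = altSearch tools E 0 0 := by
  rw [aLoop_eq E tools 0, bLoop_eq tools E 0 0]
  simp

-- ===== VERDICT (by name: the statement is the Claim_ definition above) =====
theorem check_ordered_tools_spec : Claim_equal_check_ordered_tools := by
  intro tools_used expected_tools _
  unfold Spec_check_ordered_tools
  unfold check_ordered_tools check_ordered_tools_alt
  rw [count_agree tools_used expected_tools]
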